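-- pv_equiv track=rewrite | github.com/lucianomel/100DaysOfPython | day39/flight-deals-start/notification_manager.py | parse_stop_overs
-- ===== SOURCE A (Python) =====
-- def parse_stop_overs(itineraries, departure_city, arrival_city):
--     # Get every city that the plane goes through in stop-overs
--     all_stop_over_cities = []
--     for stop_over in itineraries:
--         all_stop_over_cities.append(stop_over['cityTo'])
--         all_stop_over_cities.append(stop_over['cityFrom'])
--
--     # Get every city that's not dest or origin
--     stop_overs_cities_w_reps = []
--     for stop_over in all_stop_over_cities:
--         if stop_over == departure_city or stop_over == arrival_city:
--             continue
--         else: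
--             stop_overs_cities_w_reps.append(stop_over)
--
--     # Remove repeated cities
--     stop_over_cities = list(dict.fromkeys(stop_overs_cities_w_reps))
--
--     return stop_over_cities
-- ===== SOURCE B (Python) =====
-- def parse_stop_overs(itineraries, departure_city, arrival_city):
--     # All stop-over cities (cityTo then cityFrom), minus origin/destination.
--     cities = [c for stop_over in itineraries
--               for c in (stop_over['cityTo'], stop_over['cityFrom'])
--               if c != departure_city and c != arrival_city]
--     # Dedup by repeated filtering: emit the head, delete all its occurrences, repeat.
--     result = []
--     while cities:
--         head = cities[0]
--         result.append(head)
--         cities = [c for c in cities[1:] if c != head]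
--     return result
-- ===== Notes on version B (the rewrite author's own statement) =====
-- stated objective: alternative
-- what changed: A deduplicates in one linear pass via dict.fromkeys after two collection passes; B deduplicates by repeated filtering (emit the current head, delete all its remaining occurrences, repeat until empty), a quadratic selection-style algorithm with no dict/set state.
import Mathlib
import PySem

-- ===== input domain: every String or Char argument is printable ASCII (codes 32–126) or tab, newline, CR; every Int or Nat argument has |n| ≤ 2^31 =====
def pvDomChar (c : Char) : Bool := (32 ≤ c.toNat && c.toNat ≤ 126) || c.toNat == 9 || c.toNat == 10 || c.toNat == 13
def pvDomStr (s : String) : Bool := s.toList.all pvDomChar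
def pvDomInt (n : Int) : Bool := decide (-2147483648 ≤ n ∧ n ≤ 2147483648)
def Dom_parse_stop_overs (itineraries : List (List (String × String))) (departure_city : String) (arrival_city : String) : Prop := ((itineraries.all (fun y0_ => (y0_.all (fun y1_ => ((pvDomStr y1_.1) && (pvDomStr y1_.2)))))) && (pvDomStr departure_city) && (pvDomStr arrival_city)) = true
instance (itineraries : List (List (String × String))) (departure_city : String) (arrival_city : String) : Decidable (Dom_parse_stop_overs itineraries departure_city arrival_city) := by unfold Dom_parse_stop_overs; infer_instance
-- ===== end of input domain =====

-- B deduplicates by repeated filtering (emit head, delete its occurrences, repeat) instead of A's dict.fromkeys pass (objective: alternative).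

-- ===== PORT A =====
-- stop_over['k'] on a Python dict given as an association list (KeyError = none, excluded by Pre_)
def pvLookup (d : List (String × String)) (k : String) : String :=
  (PySem.Dict.ofList d).getD k ""

def parse_stop_overs (itineraries : List (List (String × String))) (departure_city : String) (arrival_city : String) : List String :=
  -- pass 1: collect every cityTo / cityFrom
  let all_stop_over_cities :=
    itineraries.foldl (fun acc stop_over =>
      (acc ++ [pvLookup stop_over "cityTo"]) ++ [pvLookup stop_over "cityFrom"]) []
  -- pass 2: drop departure / arrival cities
  let stop_overs_cities_w_reps :=
    all_stop_over_cities.foldl (fun acc stop_over =>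
      if stop_over = departure_city ∨ stop_over = arrival_city then acc else acc ++ [stop_over]) []
  -- pass 3: list(dict.fromkeys(...))
  PySem.List.dedup stop_overs_cities_w_reps

-- ===== PORT B =====
-- the while loop of Source B: emit the head, delete all its remaining occurrences, repeat
def pvUniq : List String → List String
  | [] => []
  | h :: t => h :: pvUniq (t.filter (fun c => c ≠ h))
termination_by cs => cs.length
decreasing_by simpa using Nat.lt_succ_of_le ((List.length_filter_le _ _).trans (by simp))

def parse_stop_overs_alt (itineraries : List (List (String × String))) (departure_city : String) (arrival_city : String) : List String :=
  pvUniq (itineraries.flatMap (fun stop_over =>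
    ([pvLookup stop_over "cityTo", pvLookup stop_over "cityFrom"]).filter
      (fun c => c ≠ departure_city && c ≠ arrival_city)))

-- ===== PRECONDITION & SPEC =====
-- Pre_ excludes itineraries missing a 'cityTo' or 'cityFrom' key, on which Python A raises KeyError.
def Pre_parse_stop_overs (itineraries : List (List (String × String))) (departure_city : String) (arrival_city : String) : Prop :=
  ∀ d ∈ itineraries, "cityTo" ∈ d.map Prod.fst ∧ "cityFrom" ∈ d.map Prod.fst
instance (itineraries : List (List (String × String))) (departure_city : String) (arrival_city : String) : Decidable (Pre_parse_stop_overs itineraries departure_city arrival_city) := by unfold Pre_parse_stop_overs; infer_instance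
def pvWitness_parse_stop_overs : (List (List (String × String))) × String × String :=
  ([[("cityTo", "B"), ("cityFrom", "A")], [("cityTo", "C"), ("cityFrom", "B")]], "A", "C")

def Spec_parse_stop_overs (itineraries : List (List (String × String))) (departure_city : String) (arrival_city : String) (out : List String) : Prop := out = parse_stop_overs_alt itineraries departure_city arrival_city
instance (itineraries : List (List (String × String))) (departure_city : String) (arrival_city : String) (out : List String) : Decidable (Spec_parse_stop_overs itineraries departure_city arrival_city out) := by unfold Spec_parse_stop_overs; infer_instance

-- ===== CLAIM =====
def Claim_equal_parse_stop_overs : Prop := ∀ (itineraries : List (List (String × String))) (departure_city : String) (arrival_city : String), Dom_parse_stop_overs itineraries departure_city arrival_city → Pre_parse_stop_overs itineraries departure_city arrival_city → Spec_parse_stop_overs itineraries departure_city arrival_city (parse_stop_overs itineraries departure_city arrival_city)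

-- ===== LEMMAS AND PROOFS =====

-- A's first pass (append fold) collects exactly the flatMap of the two cities
lemma pass1_eq (its : List (List (String × String))) :
    its.foldl (fun acc so => (acc ++ [pvLookup so "cityTo"]) ++ [pvLookup so "cityFrom"]) []
      = its.flatMap (fun so => [pvLookup so "cityTo", pvLookup so "cityFrom"]) := by
  have h : ∀ (l : List (List (String × String))) (acc : List String),
      l.foldl (fun acc so => (acc ++ [pvLookup so "cityTo"]) ++ [pvLookup so "cityFrom"]) acc
        = acc ++ l.flatMap (fun so => [pvLookup so "cityTo", pvLookup so "cityFrom"]) := by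
    intro l
    induction l with
    | nil => simp
    | cons d rest ih =>
        intro acc
        rw [List.foldl_cons, ih, List.flatMap_cons]
        simp
  simpa using h its []

-- A's second pass (skip-or-append fold) is a filter
lemma pass2_eq (dep arr : String) (cs : List String) :
    cs.foldl (fun acc c => if c = dep ∨ c = arr then acc else acc ++ [c]) []
      = cs.filter (fun c => c ≠ dep && c ≠ arr) := by
  have h : ∀ (l : List String) (acc : List String),
      l.foldl (fun acc c => if c = dep ∨ c = arr then acc else acc ++ [c]) acc
        = acc ++ l.filter (fun c => c ≠ dep && c ≠ arr) := by
    intro l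
    induction l with
    | nil => simp
    | cons c rest ih =>
        intro acc
        by_cases h1 : c = dep ∨ c = arr <;>
          simp [List.filter_cons, h1, ih] <;> tauto
  simpa using h cs []

-- filter commutes with flatMap
lemma filter_flatMap_eq (dep arr : String) (its : List (List (String × String))) :
    (its.flatMap (fun so => [pvLookup so "cityTo", pvLookup so "cityFrom"])).filter
        (fun c => c ≠ dep && c ≠ arr)
      = its.flatMap (fun so =>
          ([pvLookup so "cityTo", pvLookup so "cityFrom"]).filter (fun c => c ≠ dep && c ≠ arr)) := by
  induction its with
  | nil => rfl
  | cons d rest ih =>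
      rw [List.flatMap_cons, List.flatMap_cons, List.filter_append, ih]

-- removing x from set(xs) is set(xs with x removed)
lemma discard_ofList_filter : ∀ (xs : List String) (x : String),
    PySem.Set.discard (PySem.Set.ofList xs) x = PySem.Set.ofList (xs.filter (fun c => c ≠ x)) := by
  intro xs
  induction xs with
  | nil => intro x; rfl
  | cons h t ih =>
      intro x
      rw [PySem.Set.ofList_cons, List.filter_cons]
      by_cases hx : h = x
      · subst hx
        simp only [PySem.Set.discard] at *
        simp [ih]
      · have ih' := ih x
        simp only [ne_eq, decide_not] at ih' ⊢
        rw [if_pos (show (!decide (h = x)) = true by simp [hx]), PySem.Set.ofList_cons]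
        simp only [PySem.Set.discard]
        rw [List.filter_cons, if_pos (show (!(h == x)) = true by simp [hx]),
          ← ih']
        simp only [PySem.Set.discard, List.filter_filter]
        simp [Bool.and_comm]

-- dict.fromkeys dedup satisfies the repeated-filtering recursion
lemma dedup_cons (h : String) (t : List String) :
    PySem.List.dedup (h :: t) = h :: PySem.List.dedup (t.filter (fun c => c ≠ h)) := by
  rw [PySem.List.dedup_eq_ofList, PySem.List.dedup_eq_ofList,
    PySem.Set.ofList_cons, discard_ofList_filter]

-- hence dict.fromkeys dedup equals the repeated-filtering dedup
lemma dedup_eq_pvUniq : ∀ (cs : List String), PySem.List.dedup cs = pvUniq cs := by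
  intro cs
  induction hn : cs.length using Nat.strong_induction_on generalizing cs with
  | _ n ih =>
    cases cs with
    | nil => rw [pvUniq]; simp [PySem.List.dedup_eq_ofList]
    | cons h t =>
        have hlen : (t.filter (fun c => c ≠ h)).length < n := by
          subst hn
          simpa using Nat.lt_succ_of_le (List.length_filter_le _ _)
        rw [dedup_cons, pvUniq, ih _ hlen _ rfl]

-- ===== VERDICT =====
theorem parse_stop_overs_spec : Claim_equal_parse_stop_overs := by
  intro its dep arr _ _
  unfold Spec_parse_stop_overs parse_stop_overs parse_stop_overs_alt
  dsimp only
  rw [pass1_eq, pass2_eq, dedup_eq_pvUniq, filter_flatMap_eq]
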